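-- pv_equiv track=rewrite | github.com/Sahej-Singh/Python-test | pi.py | minInitialEnergy
-- ===== SOURCE A (Python) =====
-- def minInitialEnergy(arr):
--     n = len(arr)
--     initMinEnergy = 0
--     currEnergy = 0
--     flag = 0
--     for i in range(n):
--         currEnergy += arr[i]
--         if currEnergy <= 0 :
--             initMinEnergy += (abs(currEnergy) +1)
--             currEnergy = 1
--             flag = 1
--     return 1 if flag == 0 else initMinEnergy
-- ===== SOURCE B (Python) =====
-- def minInitialEnergy(arr):
--     s = 0
--     mn = 0
--     for x in arr:
--         s += x
--         mn = min(mn, s)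
--     return max(1, 1 - mn)
-- ===== Notes on version B (the rewrite author's own statement) =====
-- stated objective: simpler
-- what changed: Replaces the greedy inject-and-reset accumulation (flag, abs, energy counter) by tracking the minimum prefix sum in one pass and applying the closed formula max(1, 1 - min_prefix).
import Mathlib
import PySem

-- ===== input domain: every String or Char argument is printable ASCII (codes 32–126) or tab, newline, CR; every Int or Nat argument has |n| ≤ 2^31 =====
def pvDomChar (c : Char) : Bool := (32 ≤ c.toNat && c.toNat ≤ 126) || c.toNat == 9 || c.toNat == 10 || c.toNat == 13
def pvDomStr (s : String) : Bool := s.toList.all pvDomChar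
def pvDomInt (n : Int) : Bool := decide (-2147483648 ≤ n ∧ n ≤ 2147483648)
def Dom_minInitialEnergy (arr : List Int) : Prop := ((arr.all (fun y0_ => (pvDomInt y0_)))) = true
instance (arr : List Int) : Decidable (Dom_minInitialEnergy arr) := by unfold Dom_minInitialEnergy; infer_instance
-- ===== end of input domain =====

-- B replaces A's greedy inject-and-reset energy accumulation by a running minimum
-- prefix sum and the closed final formula max(1, 1 - mn); same O(n) cost, simpler.

-- ===== PORT A =====
-- state = (initMinEnergy, currEnergy, flag)
def pvStepA (st : Int × Int × Int) (x : Int) : Int × Int × Int :=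
  let c := st.2.1 + x
  if c ≤ 0 then (st.1 + (|c| + 1), 1, 1) else (st.1, c, st.2.2)

def minInitialEnergy (arr : List Int) : Int :=
  let st := (PySem.List.pyRange 0 (arr.length : Int) 1).foldl
      (fun st i => pvStepA st (PySem.List.pyGetD arr i 0)) (0, 0, 0)
  if st.2.2 = 0 then 1 else st.1

-- ===== PORT B =====
-- state = (s, mn)
def pvStepB (st : Int × Int) (x : Int) : Int × Int :=
  (st.1 + x, min st.2 (st.1 + x))

def minInitialEnergy_alt (arr : List Int) : Int :=
  max 1 (1 - (arr.foldl pvStepB (0, 0)).2)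

-- ===== PRECONDITION & SPEC =====
def Spec_minInitialEnergy (arr : List Int) (out : Int) : Prop := out = minInitialEnergy_alt arr
instance (arr : List Int) (out : Int) : Decidable (Spec_minInitialEnergy arr out) := by unfold Spec_minInitialEnergy; infer_instance

-- ===== CLAIM (what is proved, stated in full; the proofs are below) =====
def Claim_equal_minInitialEnergy : Prop := ∀ (arr : List Int), Dom_minInitialEnergy arr → Spec_minInitialEnergy arr (minInitialEnergy arr)

-- ===== LEMMAS AND PROOFS =====

-- loop invariant linking A's (energy, current, flag) state to B's (sum, min) state
lemma pvLoop_rel (l : List Int) (e c f s mn : Int)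
    (h : (f = 0 ∧ e = 0 ∧ c = s ∧ mn = 0) ∨ (f = 1 ∧ e = 1 - mn ∧ c = s - mn + 1 ∧ mn ≤ 0)) :
    (((l.foldl pvStepA (e, c, f)).2.2 = 0 ∧ (l.foldl pvStepA (e, c, f)).1 = e ∧
        (l.foldl pvStepB (s, mn)).2 = mn) ∧ f = 0 ∧ e = 0 ∧ mn = 0) ∨
    ((l.foldl pvStepA (e, c, f)).2.2 = 1 ∧
        (l.foldl pvStepA (e, c, f)).1 = 1 - (l.foldl pvStepB (s, mn)).2 ∧
        (l.foldl pvStepB (s, mn)).2 ≤ 0) := by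
  induction l generalizing e c f s mn with
  | nil =>
    simp only [List.foldl_nil]
    rcases h with ⟨h1, h2, h3, h4⟩ | ⟨h1, h2, h3, h4⟩
    · exact Or.inl ⟨⟨h1, trivial, trivial⟩, h1, h2, h4⟩
    · exact Or.inr ⟨h1, by omega, h4⟩
  | cons x l ih =>
    simp only [List.foldl_cons, pvStepA, pvStepB]
    split_ifs with hc
    · -- A injects energy; new A state (e + |c+x| + 1, 1, 1)
      have habs : |c + x| = -(c + x) := abs_of_nonpos hc
      have h' : ((1:Int) = 0 ∧ e + (|c + x| + 1) = 0 ∧ (1:Int) = s + x ∧ min mn (s + x) = 0) ∨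
          ((1:Int) = 1 ∧ e + (|c + x| + 1) = 1 - min mn (s + x) ∧
            (1:Int) = (s + x) - min mn (s + x) + 1 ∧ min mn (s + x) ≤ 0) := by
        rcases h with ⟨h1, h2, h3, h4⟩ | ⟨h1, h2, h3, h4⟩ <;> right <;>
          refine ⟨rfl, ?_, ?_, ?_⟩ <;> omega
      have := ih (e + (|c + x| + 1)) 1 1 (s + x) (min mn (s + x)) h'
      rcases this with ⟨_, hf, _⟩ | hr
      · exact absurd hf one_ne_zero
      · exact Or.inr hr
    · rcases h with ⟨h1, h2, h3, h4⟩ | ⟨h1, h2, h3, h4⟩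
      · -- f = 0, mn = 0, and the new prefix sum stays positive, so min is unchanged
        have := ih e (c + x) f (s + x) (min mn (s + x))
          (Or.inl ⟨h1, h2, by omega, by omega⟩)
        rcases this with ⟨⟨ha, hb, hcc⟩, hf, he, _⟩ | hr
        · exact Or.inl ⟨⟨ha, hb, by omega⟩, hf, he, h4⟩
        · exact Or.inr hr
      · have := ih e (c + x) f (s + x) (min mn (s + x))
          (Or.inr ⟨h1, by omega, by omega, by omega⟩)
        rcases this with ⟨_, hf, _⟩ | hr
        · exact absurd hf (by omega)
        · exact Or.inr hr

-- ===== VERDICT (by name: the statement is the Claim_ definition above) =====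
theorem minInitialEnergy_spec : Claim_equal_minInitialEnergy := by
  intro arr _
  unfold Spec_minInitialEnergy minInitialEnergy minInitialEnergy_alt
  rw [PySem.List.foldl_pyRange_zero_pyGetD' arr 0 pvStepA (0, 0, 0)]
  have h := pvLoop_rel arr 0 0 0 0 0 (Or.inl ⟨rfl, rfl, rfl, rfl⟩)
  rcases h with ⟨⟨hf, _, hmn⟩, _⟩ | ⟨hf, he, hmn⟩
  · simp only [hf, hmn]; norm_num
  · rw [if_neg (by omega)]
    omega
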